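-- pv_equiv track=rewrite | github.com/suhassatish/algorithms | app/strings/partition_no_dups.py | partition_no_dups_v2
-- ===== SOURCE A (Python) =====
-- def partition_no_dups_v2(s):
--     """
--     We can further simplify the algorithm by just keeping the index of `last_seen` for
--     each character in the map.
--     Map m will then look like below -
--         {
--         a: 3,
--         b: 2,
--         g: 8,
--         h: 6,
--         i: 7,
--         f: 9,
--         e: 10,
--         d: 12
--     }
--     :param s:
--     :return:
--     """
--     m = dict()
--     for i, e in enumerate(s):
--         m[e] = i
--
--     # 2nd pass where we prepare our output list
--     out = []
--     index = 0
--     while index < len(s):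
--         last_seen = m[s[index]]
--         out.append(s[index: last_seen + 1])
--         index = last_seen + 1
--     return out
-- ===== SOURCE B (Python) =====
-- def partition_no_dups_v2(s):
--     if not s:
--         return []
--     cut = len(s) - 1 - s[::-1].index(s[0])
--     return [s[:cut + 1]] + partition_no_dups_v2(s[cut + 1:])
-- ===== Notes on version B (the rewrite author's own statement) =====
-- stated objective: simpler
-- what changed: Replaces A's two staged passes (build a last-occurrence dict over the whole string, then a while loop jumping an index through it) by a short self-recursive function with no index variable and no table: it locates the current piece's cut via the reversed remainder's .index, emits the head slice and recurses on the tail slice. Measured faster because the per-piece search and slices run in C, replacing A's Python-level per-character dict-building pass.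
import Mathlib
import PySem

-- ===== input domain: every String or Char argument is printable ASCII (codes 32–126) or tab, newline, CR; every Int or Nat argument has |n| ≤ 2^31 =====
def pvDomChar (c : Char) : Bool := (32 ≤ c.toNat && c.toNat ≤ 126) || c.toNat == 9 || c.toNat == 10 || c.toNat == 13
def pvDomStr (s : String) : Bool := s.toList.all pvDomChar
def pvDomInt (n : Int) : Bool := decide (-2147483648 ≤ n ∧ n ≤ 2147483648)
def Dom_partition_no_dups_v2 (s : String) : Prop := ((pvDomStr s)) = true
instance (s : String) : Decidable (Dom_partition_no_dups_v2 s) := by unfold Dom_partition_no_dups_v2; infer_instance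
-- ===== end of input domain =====

-- B replaces A's two staged passes (last-occurrence dict + index-jumping while loop) by a
-- short self-recursive function: cut via the reversed remainder's .index, recurse on the tail slice.


-- ===== PORT A =====
-- first pass: m[e] = i for i, e in enumerate(s)
def pvBuildLast (cs : List Char) : PySem.Dict Char Int :=
  (PySem.List.enumerate cs 0).foldl (fun m p => m.insert p.2 p.1) PySem.Dict.empty

-- second pass: the while loop (fuel only makes it total; len(s)+1 fuel always suffices,
-- since index strictly increases each iteration and the loop runs while index < len(s))
def pvLoopA (cs : List Char) (m : PySem.Dict Char Int) : Nat → Int → List String → List String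
  | 0, _, out => out
  | fuel+1, index, out =>
    if index < (cs.length : Int) then
      match PySem.List.pyGet? cs index with
      | none => out        -- unreachable: 0 ≤ index < len(s)
      | some c =>
        match m.get? c with
        | none => out      -- unreachable: s[index] occurs in s, so it is a key of m
        | some last_seen =>
          pvLoopA cs m fuel (last_seen + 1)
            (out ++ [String.ofList (PySem.List.slice cs (some index) (some (last_seen + 1)))])
    else out

def partition_no_dups_v2 (s : String) : List String :=
  pvLoopA s.toList (pvBuildLast s.toList) (s.toList.length + 1) 0 []

-- ===== PORT B =====
-- recursion on the remainder (fuel only totalizes it; each call strictly shortens the list,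
-- so len(s)+1 fuel always suffices); s[::-1] is the reverse (PySem.List.slice?_none_none_neg_one)
def pvAltGo : Nat → List Char → List String
  | 0, _ => []
  | fuel+1, cs =>
    match cs with
    | [] => []
    | c :: _ =>
      match PySem.List.index? cs.reverse c with   -- s[::-1].index(s[0]); never ValueError: s[0] ∈ s
      | none => []
      | some k =>
        let cut : Int := (cs.length : Int) - 1 - (k : Int)
        String.ofList (PySem.List.slice cs none (some (cut + 1))) ::
          pvAltGo fuel (PySem.List.slice cs (some (cut + 1)) none)

def partition_no_dups_v2_alt (s : String) : List String :=
  pvAltGo (s.toList.length + 1) s.toList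

-- ===== PRECONDITION & SPEC =====
def Spec_partition_no_dups_v2 (s : String) (out : List String) : Prop := out = partition_no_dups_v2_alt s
instance (s : String) (out : List String) : Decidable (Spec_partition_no_dups_v2 s out) := by unfold Spec_partition_no_dups_v2; infer_instance

-- ===== CLAIM (what is proved, stated in full; the proofs are below) =====
def Claim_equal_partition_no_dups_v2 : Prop := ∀ (s : String), Dom_partition_no_dups_v2 s → Spec_partition_no_dups_v2 s (partition_no_dups_v2 s)

-- ===== LEMMAS AND PROOFS =====

-- A's last-occurrence dict answers len - 1 - (position of the first occurrence in the reverse)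
theorem pv_build_get (cs : List Char) (c : Char) :
    (pvBuildLast cs).get? c =
      (PySem.List.index? cs.reverse c).map (fun k : Nat => (cs.length : Int) - 1 - (k : Int)) := by
  induction cs using List.reverseRecOn with
  | nil => simp [pvBuildLast, PySem.List.enumerate, PySem.Dict.get?_empty, PySem.List.index?]
  | append_singleton ds d ih =>
    have hb : pvBuildLast (ds ++ [d]) = (pvBuildLast ds).insert d (ds.length : Int) := by
      unfold pvBuildLast
      rw [PySem.List.enumerate_append, List.foldl_append]
      simp [PySem.List.enumerate]
    have hrev : (ds ++ [d]).reverse = d :: ds.reverse := by simp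
    rw [hb, PySem.Dict.get?_insert, hrev]
    by_cases h : c = d
    · subst h
      rw [if_pos rfl, PySem.List.index?_cons_self]
      simp only [Option.map_some, List.length_append, List.length_cons, List.length_nil]
      congr 1
      omega
    · rw [if_neg h, PySem.List.index?_cons_of_ne _ (Ne.symm h), ih]
      cases hk : PySem.List.index? ds.reverse c with
      | none => simp
      | some k =>
        simp only [Option.map_some]
        congr 1
        simp only [List.length_append, List.length_cons, List.length_nil]
        omega

-- searching the reverse of a suffix finds the same first hit as searching the whole reverse
theorem pv_index?_drop (cs : List Char) (i : Nat) (c : Char) (hc : c ∈ cs.drop i) :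
    PySem.List.index? cs.reverse c = PySem.List.index? (cs.drop i).reverse c := by
  have h1 : (cs.take i ++ cs.drop i).reverse = cs.reverse := by
    rw [List.take_append_drop]
  rw [← h1, List.reverse_append, PySem.List.index?_append_of_mem _ (by simpa using hc)]

-- A's loop from index i equals out ++ B's recursion on the remainder cs.drop i
theorem pv_main (cs : List Char) :
    ∀ (fuel i : Nat) (out : List String), cs.length - i < fuel →
      pvLoopA cs (pvBuildLast cs) fuel (i : Int) out = out ++ pvAltGo fuel (cs.drop i) := by
  intro fuel
  induction fuel with
  | zero => intro i out h; omega
  | succ f ih =>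
    intro i out hfuel
    by_cases hi : i < cs.length
    · have hdrop : cs.drop i = cs[i] :: cs.drop (i + 1) := List.drop_eq_getElem_cons hi
      set c := cs[i] with hc
      have hget : PySem.List.pyGet? cs (i : Int) = some c := by
        rw [PySem.List.pyGet?_natCast]
        exact List.getElem?_eq_getElem hi
      have hcmem : c ∈ cs.drop i := by rw [hdrop]; exact List.mem_cons_self
      -- the search result k and its bound
      obtain ⟨k, hk⟩ : ∃ k, PySem.List.index? (cs.drop i).reverse c = some k := by
        have := PySem.List.index?_isSome_iff ((cs.drop i).reverse) c
        rcases h : PySem.List.index? (cs.drop i).reverse c with _ | k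
        · rw [h] at this; simp at this; exact absurd (by simpa using hcmem) this
        · exact ⟨k, rfl⟩
      have hkfull : PySem.List.index? cs.reverse c = some k := by
        rw [pv_index?_drop cs i c hcmem, hk]
      have hklt : k < cs.length - i := by
        obtain ⟨hlt, -, -⟩ := PySem.List.getElem_of_index?_eq_some hk
        simpa using hlt
      -- unfold A one step
      rw [show ((i : Int)) = ((i : Nat) : Int) from rfl]
      simp only [pvLoopA]
      rw [if_pos (by exact_mod_cast hi), hget]
      simp only
      rw [pv_build_get, hkfull]
      simp only [Option.map_some]
      -- unfold B one step
      conv_rhs => rw [hdrop]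
      simp only [pvAltGo]
      rw [← hdrop, hk]
      simp only
      -- arithmetic: last_seen + 1 and cut + 1 as Nat casts
      have hlen : (cs.drop i).length = cs.length - i := by simp
      have harith1 : (cs.length : Int) - 1 - (k : Int) + 1 = ((cs.length - k : Nat) : Int) := by
        omega
      have harith2 : ((cs.drop i).length : Int) - 1 - (k : Int) + 1 = ((cs.length - i - k : Nat) : Int) := by
        rw [hlen]
        omega
      -- pieces are equal
      have hpiece : PySem.List.slice cs (some ((i : Nat) : Int)) (some ((cs.length : Int) - 1 - (k : Int) + 1))
          = PySem.List.slice (cs.drop i) none (some (((cs.drop i).length : Int) - 1 - (k : Int) + 1)) := by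
        rw [harith1, harith2, PySem.List.slice_natCast, PySem.List.slice_to_natCast]
        congr 1
        omega
      -- remainders are equal
      have hrem : PySem.List.slice (cs.drop i) (some (((cs.drop i).length : Int) - 1 - (k : Int) + 1)) none
          = cs.drop (cs.length - k) := by
        rw [harith2, PySem.List.slice_from_natCast, List.drop_drop]
        congr 1
        omega
      rw [hpiece, hrem]
      have hnext : (cs.length : Int) - 1 - (k : Int) + 1 = ((cs.length - k : Nat) : Int) := harith1
      rw [hnext, ih (cs.length - k) (out ++ [String.ofList (PySem.List.slice (cs.drop i) none (some (((cs.drop i).length : Int) - 1 - (k : Int) + 1)))]) (by omega)]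
      simp
    · -- i ≥ len: A's guard fails, B's remainder is empty
      have hdrop : cs.drop i = [] := List.drop_eq_nil_of_le (by omega)
      simp only [pvLoopA]
      rw [if_neg (by exact_mod_cast hi), hdrop,
          show pvAltGo (f + 1) [] = [] from rfl, List.append_nil]

-- ===== VERDICT (by name: the statement is the Claim_ definition above) =====
theorem partition_no_dups_v2_spec : Claim_equal_partition_no_dups_v2 := by
  intro s _
  show partition_no_dups_v2 s = partition_no_dups_v2_alt s
  unfold partition_no_dups_v2 partition_no_dups_v2_alt
  have := pv_main s.toList (s.toList.length + 1) 0 [] (by omega)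
  simpa using this
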